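-- pv_equiv track=rewrite | github.com/dmlicht/fmindex | fmindex.py | n_less_than
-- ===== SOURCE A (Python) =====
-- from collections import Counter
-- from typing import Mapping, Sequence
--
-- def n_less_than(letters: Sequence[str]) -> Mapping[str, int]:
--     """ returns a mapping of values that occur to the number of values in the sequence that are less than it.
--
--     NOTE: A lexicographically lower valued character is one that would appear earlier in the alphabet.
--     For example A is lexicographically lower valued than B. """
--     character_counts = Counter(letters)
--     lexicographically_sorted_character_counts = sorted(character_counts.items())
--
--     lower_char_count = 0
--     n_occurring_lower_letters = {}
--     for (key, value) in lexicographically_sorted_character_counts: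
--         n_occurring_lower_letters[key] = lower_char_count
--         lower_char_count += value
--     return n_occurring_lower_letters
-- ===== SOURCE B (Python) =====
-- def n_less_than(letters):
--     """ returns a mapping of values that occur to the number of values in the sequence that are less than it. """
--     result = {}
--     for i, ch in enumerate(sorted(letters)):
--         if ch not in result:
--             result[ch] = i
--     return result
-- ===== Notes on version B (the rewrite author's own statement) =====
-- stated objective: alternative
-- what changed: drops the Counter and the running prefix-sum over sorted (key,count) items; instead sorts the whole sequence once and records, for each character, the index of its first occurrence in the sorted list (which equals the number of strictly smaller elements)
import Mathlib
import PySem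

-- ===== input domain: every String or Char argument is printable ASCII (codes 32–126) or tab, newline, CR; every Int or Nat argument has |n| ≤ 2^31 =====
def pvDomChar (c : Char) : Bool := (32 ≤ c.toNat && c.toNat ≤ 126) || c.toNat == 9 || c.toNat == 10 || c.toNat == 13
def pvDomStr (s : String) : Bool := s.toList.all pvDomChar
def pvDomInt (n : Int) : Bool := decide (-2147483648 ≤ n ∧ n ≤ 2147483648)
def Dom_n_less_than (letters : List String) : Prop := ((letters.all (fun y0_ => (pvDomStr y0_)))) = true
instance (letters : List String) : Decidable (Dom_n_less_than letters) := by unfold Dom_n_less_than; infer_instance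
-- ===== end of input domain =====

-- B replaces A's Counter + prefix-sum over sorted (key,count) items by one sort of the whole
-- sequence and a first-occurrence-index scan; same cost, different algorithm ("alternative").


-- ===== PORT A =====
def n_less_than (letters : List String) : List (String × Int) :=
  let character_counts := PySem.Dict.counter letters
  let lexicographically_sorted_character_counts :=
    PySem.List.sorted2 character_counts.items Prod.fst Prod.snd false
  let final := lexicographically_sorted_character_counts.foldl
    (fun (s : Int × PySem.Dict String Int) kv => (s.1 + kv.2, s.2.insert kv.1 s.1))
    (0, PySem.Dict.empty)
  final.2.items

-- ===== PORT B =====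
def n_less_than_alt (letters : List String) : List (String × Int) :=
  ((PySem.List.enumerate (PySem.List.sorted letters (fun x => x) false) 0).foldl
    (fun d p => if d.contains p.2 then d else d.insert p.2 p.1)
    (PySem.Dict.empty : PySem.Dict String Int)).items

-- ===== PRECONDITION & SPEC =====
def Spec_n_less_than (letters : List String) (out : List (String × Int)) : Prop := out = n_less_than_alt letters
instance (letters : List String) (out : List (String × Int)) : Decidable (Spec_n_less_than letters out) := by unfold Spec_n_less_than; infer_instance

-- ===== CLAIM (what is proved, stated in full; the proofs are below) =====
def Claim_equal_n_less_than : Prop := ∀ (letters : List String), Dom_n_less_than letters → Spec_n_less_than letters (n_less_than letters)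

-- ===== LEMMAS AND PROOFS =====

-- A's running prefix-sum over the sorted (key,count) pairs, written structurally
def scanA : List (String × Int) → Int → List (String × Int)
  | [], _ => []
  | kv :: ps, c => (kv.1, c) :: scanA ps (c + kv.2)

-- first occurrences of B's sorted list, written structurally (proof-side spec of B's loop)
def firsts : List String → List String
  | [] => []
  | a :: t => a :: (firsts t).filter (fun x => !(x == a))

lemma insertBy_congr {α : Type} (b1 b2 : α → α → Bool) (x : α) :
    ∀ ys : List α, (∀ y ∈ ys, b1 x y = b2 x y) →
      PySem.List.insertBy b1 x ys = PySem.List.insertBy b2 x ys := by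
  intro ys
  induction ys with
  | nil => intro _; rfl
  | cons y t ih =>
    intro h
    simp only [PySem.List.insertBy]
    rw [h y (by simp)]
    by_cases hb : b2 x y = true
    · simp [hb]
    · simp only [hb]
      have := ih (fun z hz => h z (by simp [hz]))
      rw [this]

lemma foldl_insertBy_congr {α : Type} (L : List α) (b1 b2 : α → α → Bool)
    (h : ∀ a ∈ L, ∀ b ∈ L, b1 a b = b2 a b) :
    ∀ (xs acc : List α), (∀ a ∈ xs, a ∈ L) → (∀ a ∈ acc, a ∈ L) →
      xs.foldl (fun acc x => PySem.List.insertBy b1 x acc) acc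
        = xs.foldl (fun acc x => PySem.List.insertBy b2 x acc) acc := by
  intro xs
  induction xs with
  | nil => intro acc _ _; rfl
  | cons x t ih =>
    intro acc hxs hacc
    simp only [List.foldl_cons]
    rw [insertBy_congr b1 b2 x acc (fun y hy => h x (hxs x (by simp)) y (hacc y hy))]
    exact ih _ (fun a ha => hxs a (by simp [ha]))
      (fun a ha => by
        rcases (PySem.List.mem_insertBy _ _ _ _).mp ha with rfl | ha'
        · exact hxs a (by simp)
        · exact hacc a ha')

-- on a list whose first components are injective, Python's tuple sort is the sort by fst
lemma sorted2_fst (xs : List (String × Int))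
    (hinj : ∀ a ∈ xs, ∀ b ∈ xs, a.1 = b.1 → a = b) :
    PySem.List.sorted2 xs Prod.fst Prod.snd false = PySem.List.sorted xs Prod.fst false := by
  show xs.foldl (fun acc x => PySem.List.insertBy _ x acc) []
      = xs.foldl (fun acc x => PySem.List.insertBy _ x acc) []
  apply foldl_insertBy_congr xs _ _ ?_ xs [] (fun a ha => ha) (by simp)
  intro a ha b hb
  rcases lt_trichotomy a.1 b.1 with hlt | heq | hgt
  · simp [hlt]
  · have : a = b := hinj a ha b hb heq
    subst this
    simp
  · simp [hgt, lt_asymm hgt]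

lemma countP_lt_or_eq {A : Type} [LinearOrder A] [BEq A] [LawfulBEq A] (l : List A) (k : A) :
    l.countP (fun x => decide (x < k) || x == k)
      = l.countP (fun x => decide (x < k)) + l.count k := by
  induction l with
  | nil => simp
  | cons a t ih =>
    simp only [List.countP_cons, List.count_cons, ih]
    by_cases he : a = k
    · subst he
      simp
      omega
    · by_cases h : a < k
      · simp [h, he]
        omega
      · simp [h, he]

-- A's fold over fresh distinct keys appends scanA
lemma foldA_items (ps : List (String × Int)) :
    ∀ (c : Int) (d : PySem.Dict String Int),
      (∀ p ∈ ps, d.contains p.1 = false) → (ps.map Prod.fst).Nodup →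
      ((ps.foldl (fun (s : Int × PySem.Dict String Int) kv => (s.1 + kv.2, s.2.insert kv.1 s.1))
          (c, d)).2).items = d.items ++ scanA ps c := by
  induction ps with
  | nil => intro c d _ _; simp [scanA]
  | cons p t ih =>
    intro c d hfresh hnd
    rw [List.map_cons] at hnd
    have hnd' : p.1 ∉ t.map Prod.fst ∧ (t.map Prod.fst).Nodup := List.nodup_cons.mp hnd
    simp only [List.foldl_cons, scanA]
    rw [ih (c + p.2) (d.insert p.1 c)
        (fun q hq => by
          rw [PySem.Dict.contains_insert]
          have h1 : d.contains q.1 = false := hfresh q (by simp [hq])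
          have h2 : ¬ q.1 = p.1 := by
            intro he
            exact hnd'.1 (he ▸ List.mem_map_of_mem hq)
          simp [h1, h2])
        hnd'.2]
    rw [PySem.Dict.items_insert_of_not_contains d c (hfresh p (by simp))]
    simp

-- the running prefix sums are the strictly-smaller counts
lemma scanA_eq (letters : List String) :
    ∀ (ks : List String) (c : Int),
      ks.Pairwise (· < ·) →
      (∀ x ∈ letters, x ∈ ks ∨ ∀ k ∈ ks, x < k) →
      c = (letters.countP (fun x => decide (∀ k ∈ ks, x < k)) : Int) →
      scanA (ks.map (fun k => (k, (letters.count k : Int)))) c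
        = ks.map (fun k => (k, (letters.countP (fun x => decide (x < k)) : Int))) := by
  intro ks
  induction ks with
  | nil => intro c _ _ _; simp [scanA]
  | cons k t ih =>
    intro c hpw hmem hc
    have hkt : ∀ k' ∈ t, k < k' := fun k' hk' => (List.pairwise_cons.mp hpw).1 k' hk'
    have hchead : c = (letters.countP (fun x => decide (x < k)) : Int) := by
      rw [hc]
      congr 1
      apply List.countP_congr
      intro x _
      simp only [decide_eq_true_eq]
      constructor
      · intro h; exact h k (by simp)
      · intro h k' hk'
        rcases List.mem_cons.mp hk' with rfl | hk''
        · exact h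
        · exact lt_trans h (hkt k' hk'')
    simp only [List.map_cons, scanA]
    rw [← hchead]
    congr 1
    apply ih
    · exact (List.pairwise_cons.mp hpw).2
    · intro x hx
      rcases hmem x hx with hin | hall
      · rcases List.mem_cons.mp hin with rfl | h
        · exact Or.inr hkt
        · exact Or.inl h
      · exact Or.inr (fun k' hk' => hall k' (by simp [hk']))
    · have hsplit : letters.countP (fun x => decide (∀ k' ∈ t, x < k'))
          = letters.countP (fun x => decide (x < k) || x == k) := by
        apply List.countP_congr
        intro x hx
        simp only [Bool.or_eq_true, decide_eq_true_eq, beq_iff_eq]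
        constructor
        · intro h
          rcases hmem x hx with hin | hall
          · rcases List.mem_cons.mp hin with rfl | hmem'
            · exact Or.inr rfl
            · exact absurd (h x hmem') (lt_irrefl x)
          · exact Or.inl (hall k (by simp))
        · rintro (h | rfl) k' hk'
          · exact lt_trans h (hkt k' hk')
          · exact hkt k' hk'
      rw [hchead, hsplit, countP_lt_or_eq]
      push_cast
      ring

lemma mem_firsts (x : String) : ∀ t : List String, x ∈ firsts t ↔ x ∈ t := by
  intro t
  induction t with
  | nil => simp [firsts]
  | cons a s ih =>
    simp only [firsts, List.mem_cons, List.mem_filter]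
    by_cases hx : x = a
    · simp [hx]
    · simp [hx, ih]

lemma nodup_firsts : ∀ t : List String, (firsts t).Nodup := by
  intro t
  induction t with
  | nil => simp [firsts]
  | cons a s ih =>
    simp only [firsts, List.nodup_cons]
    constructor
    · intro h
      simp [List.mem_filter] at h
    · exact ih.filter _

lemma pairwise_le_firsts : ∀ t : List String, t.Pairwise (· ≤ ·) → (firsts t).Pairwise (· ≤ ·) := by
  intro t
  induction t with
  | nil => intro _; simp [firsts]
  | cons a s ih =>
    intro h
    rcases List.pairwise_cons.mp h with ⟨hle, hs⟩
    simp only [firsts, List.pairwise_cons]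
    refine ⟨?_, (ih hs).filter _⟩
    intro b hb
    exact hle b ((mem_firsts b s).mp (List.mem_of_mem_filter hb))

-- B's loop characterised: it appends the unseen first occurrences with their first index
lemma loopB : ∀ (T : List String) (n : Int) (d : PySem.Dict String Int),
    T.Pairwise (· ≤ ·) →
    ((PySem.List.enumerate T n).foldl
        (fun d p => if d.contains p.2 then d else d.insert p.2 p.1) d).items
      = d.items ++ ((firsts T).filter (fun k => !d.contains k)).map
          (fun k => (k, n + (T.countP (fun x => decide (x < k)) : Int))) := by
  intro T
  induction T with
  | nil => intro n d _; simp [firsts, PySem.List.enumerate_nil]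
  | cons a t ih =>
    intro n d hpw
    rcases List.pairwise_cons.mp hpw with ⟨hle, ht⟩
    rw [PySem.List.enumerate_cons]
    simp only [List.foldl_cons]
    by_cases hca : d.contains a = true
    · rw [if_pos hca, ih (n + 1) d ht]
      have hstep : (firsts (a :: t)).filter (fun k => !d.contains k)
          = (firsts t).filter (fun k => !d.contains k) := by
        show ((a :: (firsts t).filter (fun x => !(x == a)))).filter (fun k => !d.contains k) = _
        rw [List.filter_cons, if_neg (by simp [hca]), List.filter_filter]
        apply List.filter_congr
        intro x _
        by_cases hdx : d.contains x = true
        · simp [hdx]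
        · have hxa : ¬ x = a := by rintro rfl; rw [hca] at hdx; exact hdx rfl
          simp [hdx, hxa]
      rw [hstep]
      congr 1
      apply List.map_congr_left
      intro k hk
      have hkt : k ∈ t := (mem_firsts k t).mp (List.mem_filter.mp hk).1
      have hka : ¬ k = a := by
        rintro rfl
        have := (List.mem_filter.mp hk).2
        rw [hca] at this; simp at this
      have hak : a < k := lt_of_le_of_ne (hle k hkt) (fun h => hka h.symm)
      have hcnt : (a :: t).countP (fun x => decide (x < k))
          = t.countP (fun x => decide (x < k)) + 1 := by
        rw [List.countP_cons]; simp [hak]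
      simp only [hcnt, Prod.mk.injEq, true_and]
      push_cast
      ring
    · rw [if_neg hca, ih (n + 1) (d.insert a n) ht]
      rw [PySem.Dict.items_insert_of_not_contains d n (by simpa using hca)]
      rw [List.append_assoc]
      congr 1
      have hstep : (firsts (a :: t)).filter (fun k => !d.contains k)
          = a :: (firsts t).filter (fun k => !(d.insert a n).contains k) := by
        show ((a :: (firsts t).filter (fun x => !(x == a)))).filter (fun k => !d.contains k) = _
        rw [List.filter_cons, if_pos (by simp [hca]), List.filter_filter]
        congr 1
        apply List.filter_congr
        intro x _
        rw [PySem.Dict.contains_insert]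
        by_cases hxa : x = a
        · simp [hxa]
        · simp [Bool.and_comm]
      rw [hstep, List.map_cons, List.singleton_append]
      congr 1
      · have hhead : (a :: t).countP (fun x => decide (x < a)) = 0 := by
          apply List.countP_eq_zero.mpr
          intro x hx
          rcases List.mem_cons.mp hx with rfl | hx'
          · simp
          · simp only [decide_eq_true_eq]
            exact not_lt.mpr (hle x hx')
        rw [hhead]
        simp
      · apply List.map_congr_left
        intro k hk
        have hk2 := (List.mem_filter.mp hk).2
        have hkt : k ∈ t := (mem_firsts k t).mp (List.mem_filter.mp hk).1
        have hka : ¬ k = a := by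
          rintro rfl
          rw [PySem.Dict.contains_insert] at hk2
          simp at hk2
        have hak : a < k := lt_of_le_of_ne (hle k hkt) (fun h => hka h.symm)
        have hcnt : (a :: t).countP (fun x => decide (x < k))
            = t.countP (fun x => decide (x < k)) + 1 := by
          rw [List.countP_cons]; simp [hak]
        simp only [hcnt, Prod.mk.injEq, true_and]
        push_cast
        ring

-- B equals the canonical map over first occurrences of the sorted list
lemma B_eq (letters : List String) :
    n_less_than_alt letters
      = (firsts (PySem.List.sorted letters (fun x => x) false)).map
          (fun k => (k, (letters.countP (fun x => decide (x < k)) : Int))) := by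
  unfold n_less_than_alt
  rw [loopB _ 0 _ (PySem.List.sorted_pairwise letters (fun x => x))]
  have hemp : (PySem.Dict.empty : PySem.Dict String Int).items = [] := rfl
  simp only [hemp, PySem.Dict.contains_empty, Bool.not_false, List.filter_true,
    List.nil_append]
  apply List.map_congr_left
  intro k _
  have : (PySem.List.sorted letters (fun x => x) false).countP (fun x => decide (x < k))
      = letters.countP (fun x => decide (x < k)) :=
    (PySem.List.sorted_perm letters (fun x => x) false).countP_eq _
  rw [this]
  simp

-- the sorted distinct elements ARE the first occurrences of the sorted list
lemma sorted_set_eq_firsts (letters : List String) :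
    PySem.List.sorted (PySem.Set.ofList letters) (fun x => x) false
      = firsts (PySem.List.sorted letters (fun x => x) false) := by
  apply PySem.List.sorted_eq_of_perm_of_pairwise_lt
  · apply (List.perm_ext_iff_of_nodup (nodup_firsts _) (PySem.Set.nodup_ofList letters)).mpr
    intro x
    rw [mem_firsts, PySem.List.mem_sorted, PySem.Set.mem_ofList]
  · have h1 : (firsts (PySem.List.sorted letters (fun x => x) false)).Pairwise (· ≤ ·) :=
      pairwise_le_firsts _ (PySem.List.sorted_pairwise letters (fun x => x))
    have h2 := nodup_firsts (PySem.List.sorted letters (fun x => x) false)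
    have := h1.and h2
    exact this.imp (fun h => lt_of_le_of_ne h.1 h.2)

-- A equals the same canonical map
lemma A_eq (letters : List String) :
    n_less_than letters
      = (PySem.List.sorted (PySem.Set.ofList letters) (fun x => x) false).map
          (fun k => (k, (letters.countP (fun x => decide (x < k)) : Int))) := by
  show ((PySem.List.sorted2 (PySem.Dict.counter letters).items Prod.fst Prod.snd false).foldl
      (fun (s : Int × PySem.Dict String Int) kv => (s.1 + kv.2, s.2.insert kv.1 s.1))
      (0, PySem.Dict.empty)).2.items = _
  rw [PySem.Dict.items_counter]
  rw [sorted2_fst _ (by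
    intro a ha b hb hab
    rcases List.mem_map.mp ha with ⟨ka, _, rfl⟩
    rcases List.mem_map.mp hb with ⟨kb, _, rfl⟩
    simp only at hab
    simp [hab])]
  have hsorted : PySem.List.sorted ((PySem.Set.ofList letters).map
        (fun k => (k, (letters.count k : Int)))) Prod.fst false
      = (PySem.List.sorted (PySem.Set.ofList letters) (fun x => x) false).map
        (fun k => (k, (letters.count k : Int))) := by
    apply PySem.List.sorted_eq_of_perm_of_pairwise_lt
    · exact (PySem.List.sorted_perm (PySem.Set.ofList letters) (fun x => x) false).map _
    · rw [List.pairwise_map]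
      exact PySem.List.sorted_ofList_pairwise_lt letters
  rw [hsorted]
  rw [foldA_items _ 0 PySem.Dict.empty (by simp [PySem.Dict.contains_empty])
      (by
        rw [List.map_map]
        have : (Prod.fst ∘ fun k => (k, (letters.count k : Int))) = id := rfl
        rw [this, List.map_id]
        exact ((PySem.List.sorted_perm (PySem.Set.ofList letters) (fun x => x) false).nodup_iff).mpr
          (PySem.Set.nodup_ofList letters))]
  rw [show (PySem.Dict.empty : PySem.Dict String Int).items = [] from rfl]
  rw [scanA_eq letters _ 0 (PySem.List.sorted_ofList_pairwise_lt letters)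
      (fun x hx => Or.inl ((PySem.List.mem_sorted _ _ _ x).mpr ((PySem.Set.mem_ofList letters x).mpr hx)))
      (by
        have : letters.countP (fun x => decide (∀ k ∈ PySem.List.sorted (PySem.Set.ofList letters) (fun x => x) false, x < k)) = 0 := by
          apply List.countP_eq_zero.mpr
          intro x hx
          simp only [decide_eq_true_eq, not_forall]
          exact ⟨x, (PySem.List.mem_sorted _ _ _ x).mpr ((PySem.Set.mem_ofList letters x).mpr hx), lt_irrefl x⟩
        rw [this]; simp)]
  simp

-- ===== VERDICT (by name: the statement is the Claim_ definition above) =====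
theorem n_less_than_spec : Claim_equal_n_less_than := by
  intro letters _
  unfold Spec_n_less_than
  rw [A_eq, B_eq, sorted_set_eq_firsts]
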